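-- pv_equiv track=rewrite | github.com/Pallav-cseIITD/Wiring-Aware-Gate-Placement | main.py | find_valid_points
-- ===== SOURCE A (Python) =====
-- def find_valid_points(skyline, box_width):
--     points = []
--     prev = skyline[0]
--
--     for i in range(1, box_width):
--         if skyline[i] != prev:
--             points.append([0 if prev > skyline[i] else 1, i, skyline[i]])
--         prev = skyline[i]
--
--     points.append([1, box_width, skyline[-1]])
--     return points
-- ===== SOURCE B (Python) =====
-- def find_valid_points(skyline, box_width):
--     # Run-grouping: collect (start_index, value) of each constant run in
--     # skyline[0:box_width], then emit one change record per adjacent pair of runs.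
--     runs = []
--     for idx in range(box_width):
--         v = skyline[idx]
--         if not runs or runs[-1][1] != v:
--             runs.append((idx, v))
--     points = [[0 if pv > cv else 1, i, cv]
--               for (_, pv), (i, cv) in zip(runs, runs[1:])]
--     points.append([1, box_width, skyline[-1]])
--     return points
-- ===== Notes on version B (the rewrite author's own statement) =====
-- stated objective: alternative
-- what changed: B groups the skyline prefix into constant runs (recording each run's start index and value) and emits one change record per adjacent pair of runs via zip, instead of A's rolling-prev adjacent-element comparison.
import Mathlib
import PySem

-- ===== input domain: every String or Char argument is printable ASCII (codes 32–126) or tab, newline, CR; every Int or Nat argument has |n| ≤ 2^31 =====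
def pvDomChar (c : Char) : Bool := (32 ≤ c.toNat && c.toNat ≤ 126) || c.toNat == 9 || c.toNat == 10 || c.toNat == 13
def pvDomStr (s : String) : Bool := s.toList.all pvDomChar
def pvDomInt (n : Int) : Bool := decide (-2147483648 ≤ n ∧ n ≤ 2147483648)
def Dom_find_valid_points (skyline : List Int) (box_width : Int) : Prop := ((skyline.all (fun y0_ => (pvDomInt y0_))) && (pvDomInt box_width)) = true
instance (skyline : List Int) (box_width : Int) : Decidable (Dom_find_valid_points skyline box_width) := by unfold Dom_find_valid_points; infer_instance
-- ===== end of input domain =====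

-- B replaces A's rolling-prev adjacent comparison by run grouping: it collects the
-- (start, value) of each constant run of the prefix and emits a record per pair of
-- adjacent runs (objective: alternative decomposition, same cost).

-- ===== PORT A =====
def find_valid_points (skyline : List Int) (box_width : Int) : List (List Int) :=
  let prev0 := (PySem.List.pyGet? skyline 0).getD 0   -- Pre_ excludes the IndexError (empty list)
  let st := (PySem.List.pyRange 1 box_width 1).foldl
    (fun (st : List (List Int) × Int) i =>
      let v := (PySem.List.pyGet? skyline i).getD 0   -- Pre_ excludes out-of-range i
      ((if v ≠ st.2 then st.1 ++ [[if st.2 > v then 0 else 1, i, v]] else st.1), v))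
    ([], prev0)
  st.1 ++ [[1, box_width, (PySem.List.pyGet? skyline (-1)).getD 0]]

-- ===== PORT B =====
-- B-side helper: the comprehension over zip(runs, runs[1:])
def pvPairs (runs : List (Int × Int)) : List (List Int) :=
  (runs.zip runs.tail).map (fun p => [if p.1.2 > p.2.2 then (0 : Int) else 1, p.2.1, p.2.2])

def find_valid_points_alt (skyline : List Int) (box_width : Int) : List (List Int) :=
  let runs := (PySem.List.pyRange 0 box_width 1).foldl
    (fun (rs : List (Int × Int)) idx =>
      let v := (PySem.List.pyGet? skyline idx).getD 0   -- Pre_ excludes out-of-range idx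
      match rs.getLast? with
      | none => rs ++ [(idx, v)]
      | some r => if r.2 ≠ v then rs ++ [(idx, v)] else rs) []
  pvPairs runs ++ [[1, box_width, (PySem.List.pyGet? skyline (-1)).getD 0]]

-- ===== PRECONDITION & SPEC =====
-- exactly where Python A returns: skyline nonempty and every loop index in range
def Pre_find_valid_points (skyline : List Int) (box_width : Int) : Prop :=
  skyline ≠ [] ∧ box_width ≤ (skyline.length : Int)
instance (skyline : List Int) (box_width : Int) : Decidable (Pre_find_valid_points skyline box_width) := by unfold Pre_find_valid_points; infer_instance
def pvWitness_find_valid_points : List Int × Int := ([3, 3, 1, 2], 4)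

def Spec_find_valid_points (skyline : List Int) (box_width : Int) (out : List (List Int)) : Prop := out = find_valid_points_alt skyline box_width
instance (skyline : List Int) (box_width : Int) (out : List (List Int)) : Decidable (Spec_find_valid_points skyline box_width out) := by unfold Spec_find_valid_points; infer_instance

-- ===== CLAIM (what is proved, stated in full; the proofs are below) =====
def Claim_equal_find_valid_points : Prop := ∀ (skyline : List Int) (box_width : Int), Dom_find_valid_points skyline box_width → Pre_find_valid_points skyline box_width → Spec_find_valid_points skyline box_width (find_valid_points skyline box_width)

-- ===== LEMMAS AND PROOFS =====

theorem pvPairs_append (rs : List (Int × Int)) (a x : Int × Int) (h : rs.getLast? = some a) :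
    pvPairs (rs ++ [x]) = pvPairs rs ++ [[if a.2 > x.2 then (0 : Int) else 1, x.1, x.2]] := by
  induction rs with
  | nil => simp at h
  | cons b t ih =>
    cases t with
    | nil =>
      simp [List.getLast?] at h
      subst h
      simp [pvPairs]
    | cons c t' =>
      have h' : (c :: t').getLast? = some a := by
        simpa [List.getLast?_cons_cons] using h
      have := ih h'
      simp only [pvPairs, List.cons_append, List.tail_cons, List.zip_cons_cons, List.map_cons] at this ⊢
      simpa using this

theorem pv_inv (skyline : List Int) :
    ∀ (L : List Int) (pts : List (List Int)) (prev : Int) (rs : List (Int × Int)) (j : Int),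
      rs.getLast? = some (j, prev) → pvPairs rs = pts →
      (L.foldl
        (fun (st : List (List Int) × Int) i =>
          let v := (PySem.List.pyGet? skyline i).getD 0
          ((if v ≠ st.2 then st.1 ++ [[if st.2 > v then 0 else 1, i, v]] else st.1), v))
        (pts, prev)).1
      = pvPairs (L.foldl
          (fun (rs : List (Int × Int)) idx =>
            let v := (PySem.List.pyGet? skyline idx).getD 0
            match rs.getLast? with
            | none => rs ++ [(idx, v)]
            | some r => if r.2 ≠ v then rs ++ [(idx, v)] else rs) rs) := by
  intro L
  induction L with
  | nil =>
    intro pts prev rs j h1 h2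
    simpa using h2.symm
  | cons i L ih =>
    intro pts prev rs j h1 h2
    simp only [List.foldl_cons, h1]
    set v := (PySem.List.pyGet? skyline i).getD 0 with hv
    by_cases hvp : v = prev
    · subst hvp
      have hnn : ¬ (v ≠ v) := fun h => h rfl
      rw [if_neg hnn, if_neg hnn]
      exact ih pts v rs j h1 h2
    · have hne : v ≠ prev := hvp
      have hne' : prev ≠ v := fun e => hne e.symm
      rw [if_pos hne, if_pos hne']
      refine ih _ v (rs ++ [(i, v)]) i (by simp) ?_
      rw [pvPairs_append rs (j, prev) (i, v) h1, h2]

-- ===== VERDICT (by name: the statement is the Claim_ definition above) =====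
theorem find_valid_points_spec : Claim_equal_find_valid_points := by
  intro skyline box_width _hdom _hpre
  unfold Spec_find_valid_points find_valid_points find_valid_points_alt
  by_cases hbw : box_width ≤ 0
  · rw [PySem.List.pyRange_one_eq_nil (by omega), PySem.List.pyRange_one_eq_nil hbw]
    simp [pvPairs]
  · have h1 : (0 : Int) < box_width := by omega
    rw [PySem.List.pyRange_one_cons h1]
    simp only [List.foldl_cons]
    set v0 := (PySem.List.pyGet? skyline 0).getD 0 with hv0
    have hstep : (([] : List (Int × Int)).getLast?) = none := rfl
    simp only [hstep, List.nil_append]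
    have := pv_inv skyline (PySem.List.pyRange 1 box_width 1) [] v0 [(0, v0)] 0 (by simp) (by simp [pvPairs])
    rw [this]
    simp only [zero_add]
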